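-- pv_equiv track=rewrite | github.com/Namir-Khan/Leet-Code | 2173-number-of-valid-words-in-a-sentence/2173-number-of-valid-words-in-a-sentence.py | countValidWords
-- ===== SOURCE A (Python) =====
-- def countValidWords(sentence: str) -> int:
--     words = sentence.split()
--     count = 0
--
--     for word in words:
--         if any(ch.isdigit() for ch in word):
--             continue
--
--         if len(word) == 1:
--             if word.isalpha() or word in "!.,":
--                 count += 1
--             continue
--
--         hyphen_count = 0
--         for i, ch in enumerate(word):
--             if ch == '-':
--                 hyphen_count += 1
--                 if hyphen_count > 1 or i == 0 or i == len(word) - 1 or not (word[i - 1].isalpha() and word[i + 1].isalpha()):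
--                     break
--             if ch in "!.,":
--                 if i != len(word) - 1:
--                     break
--         else:
--             count += 1
--
--     return count
-- ===== SOURCE B (Python) =====
-- def countValidWords(sentence: str) -> int:
--     def valid(word):
--         if any(ch.isdigit() for ch in word):
--             return False
--         if len(word) == 1:
--             return word.isalpha() or word in "!.,"
--         if word.count('-') > 1:
--             return False
--         i = word.find('-')
--         if i != -1 and not (0 < i < len(word) - 1
--                             and word[i - 1].isalpha() and word[i + 1].isalpha()):
--             return False
--         return all(ch not in "!.," for ch in word[:-1])
--     return sum(1 for w in sentence.split() if valid(w))
-- ===== Notes on version B (the rewrite author's own statement) =====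
-- stated objective: simpler
-- what changed: A's single interleaved character scan with break/else and a running hyphen counter is replaced by three independent per-word predicate checks: the list of hyphen positions (at most one, interior, with alphabetic neighbours) plus a separate pass checking that punctuation occurs only at the last position.
import Mathlib
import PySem

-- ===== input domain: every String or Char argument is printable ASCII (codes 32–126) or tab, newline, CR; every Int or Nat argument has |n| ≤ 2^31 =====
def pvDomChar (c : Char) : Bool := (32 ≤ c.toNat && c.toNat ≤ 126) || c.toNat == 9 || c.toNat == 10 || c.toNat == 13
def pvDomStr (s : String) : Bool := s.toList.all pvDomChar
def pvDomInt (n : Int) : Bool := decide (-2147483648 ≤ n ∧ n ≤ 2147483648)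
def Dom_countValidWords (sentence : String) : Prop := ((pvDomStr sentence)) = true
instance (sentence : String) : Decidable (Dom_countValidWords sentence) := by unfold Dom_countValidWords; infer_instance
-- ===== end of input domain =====

-- B replaces A's interleaved character scan with break/else by three independent
-- predicate checks (hyphen list, hyphen-position check, punctuation-position check): simpler decomposition.

-- ===== PORT A =====

-- the literal "!.,"
def pvPunct : List Char := ['!', '.', ',']

-- word[j].isalpha(); when evaluated by either Python the index is always in range,
-- so Option.any is exact there
def pvAlphaAt (w : List Char) (j : Int) : Bool :=
  (PySem.List.pyGet? w j).any PySem.Chars.isalpha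

-- A's inner `for i, ch in enumerate(word): … else: …` loop: true iff the else-branch runs
def pvLoopA (w : List Char) : List (Int × Char) → Int → Bool
  | [], _ => true
  | (i, ch) :: rest, hc =>
    let hc' := if ch = '-' then hc + 1 else hc
    if ch = '-' ∧ (hc' > 1 ∨ i = 0 ∨ i = (w.length : Int) - 1 ∨
        ¬(pvAlphaAt w (i - 1) = true ∧ pvAlphaAt w (i + 1) = true)) then false
    else if PySem.Chars.isIn [ch] pvPunct = true ∧ i ≠ (w.length : Int) - 1 then false
    else pvLoopA w rest hc'

def countValidWords (sentence : String) : Int :=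
  (PySem.Chars.split₀ sentence.toList).foldl
    (fun count word =>
      if word.any PySem.Chars.isdigit then count
      else if word.length = 1 then
        (if PySem.Chars.strIsalpha word || PySem.Chars.isIn word pvPunct then count + 1 else count)
      else if pvLoopA word (PySem.List.enumerate word) 0 then count + 1 else count)
    0

-- ===== PORT B =====

-- B's `valid(word)` predicate
def pvValidB (word : List Char) : Bool :=
  if word.any PySem.Chars.isdigit then false
  else if word.length = 1 then PySem.Chars.strIsalpha word || PySem.Chars.isIn word pvPunct
  else
    let hyphens := ((PySem.List.enumerate word).filter (fun p => p.2 = '-')).map (fun p => p.1)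
    if hyphens.length > 1 then false
    else if (match hyphens with
             | [] => false
             | i :: _ => !(decide (0 < i) && decide (i < (word.length : Int) - 1) &&
                            pvAlphaAt word (i - 1) && pvAlphaAt word (i + 1))) then false
    else (PySem.List.slice word none (some (-1))).all (fun ch => !(PySem.Chars.isIn [ch] pvPunct))

def countValidWords_alt (sentence : String) : Int :=
  (((PySem.Chars.split₀ sentence.toList).countP pvValidB : Nat) : Int)

-- ===== PRECONDITION & SPEC =====
def Spec_countValidWords (sentence : String) (out : Int) : Prop := out = countValidWords_alt sentence
instance (sentence : String) (out : Int) : Decidable (Spec_countValidWords sentence out) := by unfold Spec_countValidWords; infer_instance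

-- ===== CLAIM (what is proved, stated in full; the proofs are below) =====
def Claim_equal_countValidWords : Prop := ∀ (sentence : String), Dom_countValidWords sentence → Spec_countValidWords sentence (countValidWords sentence)

-- ===== LEMMAS AND PROOFS =====

-- A's per-word decision, as a Bool
def pvCountedA (word : List Char) : Bool :=
  if word.any PySem.Chars.isdigit then false
  else if word.length = 1 then PySem.Chars.strIsalpha word || PySem.Chars.isIn word pvPunct
  else pvLoopA word (PySem.List.enumerate word) 0

-- B's hyphen-position check, as a Bool
def pvPosOk (w : List Char) (i : Int) : Bool :=
  decide (0 < i) && decide (i < (w.length : Int) - 1) &&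
    pvAlphaAt w (i - 1) && pvAlphaAt w (i + 1)

-- hyphen-side factor of A's loop
def pvHy (w : List Char) : List Int → Int → Bool
  | [], _ => true
  | i :: t, hc => decide (hc = 0) && pvPosOk w i && pvHy w t (hc + 1)

-- punctuation-side factor of A's loop
def pvPn (w : List Char) : List Char → Int → Bool
  | [], _ => true
  | c :: r, s => (!(PySem.Chars.isIn [c] pvPunct) || decide (s = (w.length : Int) - 1)) && pvPn w r (s + 1)

theorem pvLoopA_eq (w : List Char) (rest : List Char) (s : Int) (hc : Int)
    (hs : 0 ≤ s) (hlen : s + rest.length = w.length) (hhc : 0 ≤ hc) :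
    pvLoopA w (PySem.List.enumerate rest s) hc =
      (pvHy w (((PySem.List.enumerate rest s).filter (fun p => p.2 = '-')).map (fun p => p.1)) hc
        && pvPn w rest s) := by
  induction rest generalizing s hc with
  | nil => simp [PySem.List.enumerate, pvLoopA, pvHy, pvPn]
  | cons c r ih =>
    have hstep : PySem.List.enumerate (c :: r) s = (s, c) :: PySem.List.enumerate r (s + 1) := rfl
    rw [hstep]
    by_cases hc0 : c = '-'
    · subst hc0
      have hpun : PySem.Chars.isIn ['-'] pvPunct = false := by decide
      have hrec := ih (s := s + 1) (hc := hc + 1) (by omega) (by simp at hlen ⊢; omega) (by omega)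
      simp only [pvLoopA, pvHy, pvPn, List.filter_cons, List.map_cons, hpun, reduceIte,
        decide_true, Bool.false_eq_true, false_and, if_false, true_and, Bool.not_false, Bool.true_or]
      by_cases hbad : (hc + 1 > 1 ∨ s = 0 ∨ s = (w.length : Int) - 1 ∨
          ¬(pvAlphaAt w (s - 1) = true ∧ pvAlphaAt w (s + 1) = true))
      · rw [if_pos hbad]
        have hz : (decide (hc = 0) && pvPosOk w s) = false := by
          rcases hbad with h | h | h | h
          · simp [show ¬ (hc = 0) by omega]
          · simp [pvPosOk, h]
          · simp [pvPosOk, h]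
          · rcases (not_and_or.mp h) with h' | h' <;> simp [pvPosOk, h']
        simp [hz]
      · rw [if_neg hbad]
        push Not at hbad
        obtain ⟨h1, h2, h3, h4⟩ := hbad
        have hhc0 : hc = 0 := by omega
        have hok : pvPosOk w s = true := by
          simp at hlen
          simp [pvPosOk]
          exact ⟨⟨⟨by omega, by omega⟩, h4.1⟩, h4.2⟩
        rw [hrec]
        simp [hhc0, hok]
    · have hrec := ih (s := s + 1) (hc := hc) (by omega) (by simp at hlen ⊢; omega) hhc
      simp only [pvLoopA, pvPn, List.filter_cons, decide_eq_true_eq, hc0, false_and, if_false]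
      by_cases hg2 : PySem.Chars.isIn [c] pvPunct = true ∧ s ≠ (w.length : Int) - 1
      · rw [if_pos hg2]
        simp [hg2.1, hg2.2]
      · rw [if_neg hg2]
        rw [hrec]
        have hfac : (!(PySem.Chars.isIn [c] pvPunct) || decide (s = (w.length : Int) - 1)) = true := by
          by_cases h : PySem.Chars.isIn [c] pvPunct = true
          · have : s = (w.length : Int) - 1 := by tauto
            simp [this]
          · have h' : PySem.Chars.isIn [c] pvPunct = false := by simp_all
            simp [h']
        rw [hfac]
        simp

theorem pvPn_eq (w : List Char) (rest : List Char) (s : Int)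
    (hlen : s + rest.length = w.length) :
    pvPn w rest s = rest.dropLast.all (fun ch => !(PySem.Chars.isIn [ch] pvPunct)) := by
  induction rest generalizing s with
  | nil => simp [pvPn]
  | cons c r ih =>
    cases r with
    | nil =>
      have hs : s = (w.length : Int) - 1 := by simp at hlen; omega
      simp [pvPn, hs]
    | cons c2 r2 =>
      have hne : ¬ (s = (w.length : Int) - 1) := by simp at hlen ⊢; omega
      have hrec := ih (s := s + 1) (by simp at hlen ⊢; omega)
      rw [show pvPn w (c :: c2 :: r2) s
            = ((!(PySem.Chars.isIn [c] pvPunct) || decide (s = (w.length : Int) - 1))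
                && pvPn w (c2 :: r2) (s + 1)) from rfl, hrec]
      simp [hne, List.dropLast]

theorem pvCountedA_eq_validB (w : List Char) : pvCountedA w = pvValidB w := by
  unfold pvCountedA pvValidB
  by_cases hd : w.any PySem.Chars.isdigit = true
  · simp [hd]
  rw [if_neg hd, if_neg hd]
  by_cases h1 : w.length = 1
  · simp [h1]
  rw [if_neg h1, if_neg h1]
  have hloop := pvLoopA_eq w w 0 0 le_rfl (by simp) le_rfl
  have hslice : PySem.List.slice w none (some (-1)) = w.dropLast := PySem.List.slice_to_neg_one w
  have hpn := pvPn_eq w w 0 (by simp)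
  rw [hloop, hpn, hslice]
  cases hhy : ((PySem.List.enumerate w).filter (fun p => p.2 = '-')).map (fun p => p.1) with
  | nil => simp [pvHy]
  | cons i t =>
    cases t with
    | nil =>
      simp [pvHy, pvPosOk, Bool.and_assoc, ← decide_not]
      congr 2
      simp [show (i < (w.length : Int) - 1) ↔ (i + 1 < (w.length : Int)) from by omega]
    | cons j t2 =>
      have : pvHy w (i :: j :: t2) 0 = false := by simp [pvHy]
      simp [this]

-- ===== VERDICT (by name: the statement is the Claim_ definition above) =====
theorem countValidWords_spec : Claim_equal_countValidWords := by
  intro sentence _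
  unfold Spec_countValidWords countValidWords countValidWords_alt
  have hbody : ∀ (count : Int) (word : List Char),
      (if word.any PySem.Chars.isdigit then count
       else if word.length = 1 then
         (if PySem.Chars.strIsalpha word || PySem.Chars.isIn word pvPunct then count + 1 else count)
       else if pvLoopA word (PySem.List.enumerate word) 0 then count + 1 else count)
        = (if pvCountedA word then count + 1 else count) := by
    intro count word
    unfold pvCountedA
    split_ifs <;> simp_all
  calc (PySem.Chars.split₀ sentence.toList).foldl
        (fun count word =>
          if word.any PySem.Chars.isdigit then count
          else if word.length = 1 then
            (if PySem.Chars.strIsalpha word || PySem.Chars.isIn word pvPunct then count + 1 else count)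
          else if pvLoopA word (PySem.List.enumerate word) 0 then count + 1 else count) 0
      = (PySem.Chars.split₀ sentence.toList).foldl
          (fun count word => if pvCountedA word then count + 1 else count) 0 := by
        exact PySem.List.foldl_congr_mem _ _ _ _ (fun acc x _ => hbody acc x)
    _ = 0 + ((PySem.Chars.split₀ sentence.toList).countP pvCountedA : Int) :=
        PySem.List.foldl_if_add_one pvCountedA _ 0
    _ = (((PySem.Chars.split₀ sentence.toList).countP pvValidB : Nat) : Int) := by
        rw [funext pvCountedA_eq_validB]; ring
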